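-- pv_equiv track=rewrite | github.com/joojaeyoon/PS | LINE/01.py | solution
-- ===== SOURCE A (Python) =====
-- def solution(answer_sheet, sheet):
--     answer = -1
--
--     cheets = []
--
--     for i in range(len(sheet)-1):
--         for j in range(i+1, len(sheet)):
--             cheet = ""
--             for k in range(len(answer_sheet)):
--                 if sheet[i][k] == sheet[j][k] and sheet[i][k] != answer_sheet[k]:
--                     cheet += "1"
--                 else:
--                     cheet += "0"
--             max_count = len(sorted(cheet.split("0"), reverse=True)[0])
--             count = cheet.count("1")
--
--             cheets.append(count+max_count*max_count)
--
--     return max(cheets)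
-- ===== SOURCE B (Python) =====
-- def solution(answer_sheet, sheet):
--     best = None
--     for i in range(len(sheet) - 1):
--         for j in range(i + 1, len(sheet)):
--             count = 0
--             cur = 0
--             run = 0
--             for k in range(len(answer_sheet)):
--                 if sheet[i][k] == sheet[j][k] and sheet[i][k] != answer_sheet[k]:
--                     count += 1
--                     cur += 1
--                     if cur > run:
--                         run = cur
--                 else:
--                     cur = 0
--             score = count + run * run
--             if best is None or score > best:
--                 best = score
--     return best
-- ===== Notes on version B (the rewrite author's own statement) =====
-- stated objective: simpler
-- what changed: The per-pair inner loop no longer builds a '0'/'1' string, splits it on '0' and sorts the chunks to find the longest run, and no list of pair scores is kept: B maintains three integers (match count, current run, best run) in one pass per pair and a running maximum over pairs.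
import Mathlib
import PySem

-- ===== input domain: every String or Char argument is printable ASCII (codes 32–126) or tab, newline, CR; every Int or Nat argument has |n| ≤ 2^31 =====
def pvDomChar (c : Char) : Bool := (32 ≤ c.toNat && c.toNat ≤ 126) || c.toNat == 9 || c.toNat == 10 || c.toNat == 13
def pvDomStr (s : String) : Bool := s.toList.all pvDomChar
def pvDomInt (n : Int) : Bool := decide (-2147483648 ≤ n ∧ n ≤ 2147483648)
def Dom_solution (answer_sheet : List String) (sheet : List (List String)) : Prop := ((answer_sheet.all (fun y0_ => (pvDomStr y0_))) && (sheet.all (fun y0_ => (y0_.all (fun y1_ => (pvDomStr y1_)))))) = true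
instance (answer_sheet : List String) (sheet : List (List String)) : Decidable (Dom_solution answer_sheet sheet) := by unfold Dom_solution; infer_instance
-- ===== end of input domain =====

-- B replaces A's per-pair string building + split/sort with integer run-length bookkeeping and a running maximum (no cheets list): a simpler, allocation-free inner loop with the same return value.

-- ===== PORT A =====
def solution (answer_sheet : List String) (sheet : List (List String)) : Int :=
  let cheets : List Int :=
    (PySem.List.pyRange 0 (PySem.List.len sheet - 1) 1).foldl (fun cheets i =>
      (PySem.List.pyRange (i + 1) (PySem.List.len sheet) 1).foldl (fun cheets j =>
        let cheet : List Char :=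
          (PySem.List.pyRange 0 (PySem.List.len answer_sheet) 1).foldl (fun cheet k =>
            if (PySem.List.pyGetD (PySem.List.pyGetD sheet i []) k "" == PySem.List.pyGetD (PySem.List.pyGetD sheet j []) k "")
                && (PySem.List.pyGetD (PySem.List.pyGetD sheet i []) k "" != PySem.List.pyGetD answer_sheet k "")
            then cheet ++ ['1'] else cheet ++ ['0']) []
        let max_count : Int :=
          PySem.List.len (PySem.List.pyGetD (PySem.List.sorted (PySem.Chars.splitOn cheet ['0']) (fun x => x) true) 0 [])
        let count : Int := (PySem.List.count cheet '1' : Int)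
        cheets ++ [count + max_count * max_count]) cheets) []
  (PySem.List.max? cheets (fun x => x)).getD 0

-- ===== PORT B =====
def solution_alt (answer_sheet : List String) (sheet : List (List String)) : Int :=
  let best : Option Int :=
    (PySem.List.pyRange 0 (PySem.List.len sheet - 1) 1).foldl (fun best i =>
      (PySem.List.pyRange (i + 1) (PySem.List.len sheet) 1).foldl (fun best j =>
        let st : Int × Int × Int :=
          (PySem.List.pyRange 0 (PySem.List.len answer_sheet) 1).foldl (fun (st : Int × Int × Int) k =>
            if (PySem.List.pyGetD (PySem.List.pyGetD sheet i []) k "" == PySem.List.pyGetD (PySem.List.pyGetD sheet j []) k "")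
                && (PySem.List.pyGetD (PySem.List.pyGetD sheet i []) k "" != PySem.List.pyGetD answer_sheet k "")
            then (st.1 + 1, st.2.1 + 1, if st.2.1 + 1 > st.2.2 then st.2.1 + 1 else st.2.2)
            else (st.1, 0, st.2.2)) (0, 0, 0)
        let score : Int := st.1 + st.2.2 * st.2.2
        match best with
        | none => some score
        | some b => if score > b then some score else some b) best) none
  best.getD 0

-- ===== PRECONDITION & SPEC =====
-- Pre_ excludes exactly the inputs on which Python A raises: fewer than two rows (max of an empty list,
-- ValueError) or some row shorter than answer_sheet (IndexError).
def Pre_solution (answer_sheet : List String) (sheet : List (List String)) : Prop :=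
  2 ≤ sheet.length ∧ ∀ row ∈ sheet, answer_sheet.length ≤ row.length
instance (answer_sheet : List String) (sheet : List (List String)) : Decidable (Pre_solution answer_sheet sheet) := by unfold Pre_solution; infer_instance
def pvWitness_solution : List String × List (List String) := (["a", "b"], [["a", "b"], ["a", "c"], ["b", "b"]])

def Spec_solution (answer_sheet : List String) (sheet : List (List String)) (out : Int) : Prop := out = solution_alt answer_sheet sheet
instance (answer_sheet : List String) (sheet : List (List String)) (out : Int) : Decidable (Spec_solution answer_sheet sheet out) := by unfold Spec_solution; infer_instance

-- ===== CLAIM (what is proved, stated in full; the proofs are below) =====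
def Claim_equal_solution : Prop := ∀ (answer_sheet : List String) (sheet : List (List String)), Dom_solution answer_sheet sheet → Pre_solution answer_sheet sheet → Spec_solution answer_sheet sheet (solution answer_sheet sheet)

-- ===== LEMMAS AND PROOFS =====

def chOf (b : Bool) : Char := if b then '1' else '0'
def runsB : List Bool → Nat × List Nat
  | [] => (0, [])
  | b :: bs => let r := runsB bs; if b then (r.1 + 1, r.2) else (0, r.1 :: r.2)

theorem go_spec : ∀ (bs : List Bool) (fuel : Nat), bs.length ≤ fuel → ∀ (cur : List Char) (acc : List (List Char)),
    PySem.Chars.splitOn.go ['0'] fuel (bs.map chOf) cur acc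
      = acc.reverse ++ ((cur.reverse ++ List.replicate (runsB bs).1 '1') :: (runsB bs).2.map (fun n => List.replicate n '1')) := by
  intro bs
  induction bs with
  | nil =>
    intro fuel _ cur acc
    cases fuel <;> (rw [PySem.Chars.splitOn.go.eq_def]; simp [runsB])
  | cons b bs ih =>
    intro fuel hf cur acc
    cases fuel with
    | zero => simp at hf
    | succ f =>
      have hf' : bs.length ≤ f := by simpa using hf
      cases b with
      | true =>
        have h1 : chOf true ≠ '0' := by decide
        rw [List.map_cons, PySem.Chars.splitOn.go]
        simp only [List.isPrefixOf]
        rw [if_neg (by simp [chOf])]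
        rw [ih f hf' (chOf true :: cur) acc]
        simp [runsB, chOf, List.replicate_succ]
      | false =>
        rw [List.map_cons, PySem.Chars.splitOn.go]
        simp only [List.isPrefixOf]
        rw [if_pos (by simp [chOf])]
        simp only [List.length_cons, List.drop_succ_cons, List.length_nil, List.drop_zero]
        rw [ih f hf' [] (cur.reverse :: acc)]
        simp [runsB]

theorem splitOn_chunks (bs : List Bool) :
    PySem.Chars.splitOn (bs.map chOf) ['0']
      = (((runsB bs).1 :: (runsB bs).2).map (fun n => List.replicate n '1')) := by
  unfold PySem.Chars.splitOn
  rw [go_spec bs (bs.map chOf).length.succ (by simp) [] []]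
  simp

def maxN (h : Nat) (t : List Nat) : Nat := t.foldl max h

theorem maxN_spec : ∀ (t : List Nat) (h : Nat), h ≤ maxN h t ∧ ∀ x ∈ t, x ≤ maxN h t := by
  intro t
  induction t with
  | nil => intro h; simp [maxN]
  | cons y t ih =>
    intro h
    have := ih (max h y)
    constructor
    · exact le_trans (le_max_left h y) this.1
    · intro x hx
      rcases List.mem_cons.1 hx with rfl | hx
      · exact le_trans (le_max_right h x) this.1
      · exact this.2 x hx

theorem maxN_mem : ∀ (t : List Nat) (h : Nat), maxN h t ∈ h :: t := by
  intro t
  induction t with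
  | nil => intro h; simp [maxN]
  | cons y t ih =>
    intro h
    have := ih (max h y)
    rcases List.mem_cons.1 this with he | hm
    · rcases max_choice h y with h1 | h1
      · exact List.mem_cons.2 (Or.inl (by simpa [maxN, h1] using he))
      · refine List.mem_cons.2 (Or.inr (List.mem_cons.2 (Or.inl ?_)))
        simpa [maxN, h1] using he
    · exact List.mem_cons.2 (Or.inr (List.mem_cons.2 (Or.inr (by simpa [maxN] using hm))))

theorem repl_lt (c : Char) : ∀ a b : Nat, List.replicate a c < List.replicate b c ↔ a < b := by
  intro a
  induction a with
  | zero => intro b; cases b <;> simp [List.replicate_succ]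
  | succ n ih =>
    intro b
    cases b with
    | zero => simp
    | succ m => simpa [List.replicate_succ, List.cons_lt_cons_self] using ih m

theorem repl_le (c : Char) (a b : Nat) : List.replicate a c ≤ List.replicate b c ↔ a ≤ b := by
  rw [← not_lt, ← not_lt, repl_lt]

theorem sorted_swap_inst (L : List (List Char)) (key : List Char → List Char) :
    PySem.List.sorted L key true
      = @PySem.List.sorted (List Char) (List Char) List.instLinearOrder.toLT LinearOrder.toDecidableLT L key true := by
  rw [PySem.List.sorted_rev_eq_foldl_insertBy,
    @PySem.List.sorted_rev_eq_foldl_insertBy (List Char) (List Char) List.instLinearOrder.toLT LinearOrder.toDecidableLT L key]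
  congr 1
  funext acc x
  congr 1
  funext a b
  exact decide_eq_decide.mpr Iff.rfl

theorem head_sorted_repl (h : Nat) (t : List Nat) :
    PySem.List.pyGetD (PySem.List.sorted ((h :: t).map (fun n => List.replicate n '1')) (fun x => x) true) 0 []
      = List.replicate (maxN h t) '1' := by
  set L := (h :: t).map (fun n => List.replicate n '1') with hL
  rw [sorted_swap_inst]
  set S := @PySem.List.sorted (List Char) (List Char) List.instLinearOrder.toLT LinearOrder.toDecidableLT L (fun x => x) true with hS
  have hperm : S.Perm L := @PySem.List.sorted_perm (List Char) (List Char) List.instLinearOrder.toLT LinearOrder.toDecidableLT L (fun x => x) true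
  have hne : S ≠ [] := by
    intro he
    have := hperm.length_eq
    rw [he, hL] at this
    simp at this
  obtain ⟨m, rest, hsort⟩ := List.exists_cons_of_ne_nil hne
  have hmem : m ∈ L := hperm.mem_iff.1 (by simp [hsort])
  obtain ⟨rm, hrm, hme⟩ := List.mem_map.1 hmem
  have hub : ∀ y ∈ L, y ≤ m := PySem.List.key_head_sorted_rev_ge L (fun x => x) (hS ▸ hsort)
  have hubn : ∀ r ∈ h :: t, r ≤ rm := by
    intro r hr
    have := hub (List.replicate r '1') (List.mem_map.2 ⟨r, hr, rfl⟩)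
    rw [← hme] at this
    exact (repl_le '1' r rm).1 this
  have h1 : rm ≤ maxN h t := by
    rcases List.mem_cons.1 hrm with rfl | hm
    · exact (maxN_spec t rm).1
    · exact (maxN_spec t h).2 rm hm
  have h2 : maxN h t ≤ rm := hubn _ (maxN_mem t h)
  have : rm = maxN h t := le_antisymm h1 h2
  rw [hsort, PySem.List.pyGetD_zero_cons, ← hme, this]

def stepRB (rb : Int × Int) (b : Bool) : Int × Int :=
  if b then (rb.1 + 1, if rb.1 + 1 > rb.2 then rb.1 + 1 else rb.2) else (0, rb.2)

def mrun (r : Int) (bs : List Bool) : Int :=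
  ((runsB bs).2.map (Nat.cast : Nat → Int)).foldl max (r + (runsB bs).1)

theorem foldl_max_init (t : List Int) : ∀ a b : Int, t.foldl max (max a b) = max a (t.foldl max b) := by
  induction t with
  | nil => intro a b; simp
  | cons x t ih =>
    intro a b
    simp only [List.foldl_cons, max_assoc]
    exact ih a (max b x)

theorem mrun_ge (r : Int) (bs : List Bool) : r ≤ mrun r bs := by
  have h1 := (PySem.List.le_foldl_max ((runsB bs).2.map (Nat.cast : Nat → Int)) (r + (runsB bs).1)).1
  have h2 : r ≤ r + ((runsB bs).1 : Int) := by
    have : (0:Int) ≤ ((runsB bs).1 : Int) := Int.natCast_nonneg _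
    omega
  exact le_trans h2 h1

theorem bestfold : ∀ (bs : List Bool) (r bst : Int), 0 ≤ r → r ≤ bst →
    (bs.foldl stepRB (r, bst)).2 = max bst (mrun r bs) := by
  intro bs
  induction bs with
  | nil =>
    intro r bst h0 hrb
    simp only [List.foldl_nil, mrun, runsB, List.map_nil, List.foldl_nil]
    simp only [Nat.cast_zero, add_zero]
    omega
  | cons b bs ih =>
    intro r bst h0 hrb
    cases b with
    | true =>
      have hstep : stepRB (r, bst) true = (r + 1, max bst (r + 1)) := by
        simp only [stepRB, if_true]
        have : (if r + 1 > bst then r + 1 else bst) = max bst (r + 1) := by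
          rcases le_total (r+1) bst with h | h <;> simp [max_def] <;> omega
        rw [this]
      rw [List.foldl_cons, hstep, ih (r+1) (max bst (r+1)) (by omega) (le_max_right _ _)]
      have hm : mrun r (true :: bs) = mrun (r+1) bs := by
        simp only [mrun, runsB]
        congr 1
        push_cast
        ring
      rw [hm, max_assoc]
      congr 1
      have := mrun_ge (r+1) bs
      omega
    | false =>
      have hstep : stepRB (r, bst) false = (0, bst) := by simp [stepRB]
      rw [List.foldl_cons, hstep, ih 0 bst le_rfl (by omega)]
      have hm : mrun r (false :: bs) = max r (mrun 0 bs) := by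
        simp only [mrun, runsB, Bool.false_eq_true, if_false]
        simp only [List.map_cons, List.foldl_cons, Nat.cast_zero, add_zero, zero_add]
        exact foldl_max_init _ r _
      rw [hm]
      rcases le_total (mrun 0 bs) r with h | h
      · rw [max_eq_left h]
        have := mrun_ge 0 bs
        omega
      · rw [max_eq_right h]

theorem maxN_cast : ∀ (t : List Nat) (h : Nat),
    ((maxN h t : Nat) : Int) = (t.map (Nat.cast : Nat → Int)).foldl max (h : Int) := by
  intro t
  induction t with
  | nil => intro h; simp [maxN]
  | cons x t ih =>
    intro h
    simp only [maxN, List.foldl_cons, List.map_cons] at *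
    rw [ih (max h x), Nat.cast_max]

theorem chOf_inj : Function.Injective chOf := by
  intro a b h
  cases a <;> cases b <;> simp_all [chOf]

theorem cheet_fold (t : Int → Bool) (xs : List Int) :
    xs.foldl (fun cheet k => if t k then cheet ++ ['1'] else cheet ++ ['0']) []
      = (xs.map t).map chOf := by
  have hb : (fun (cheet : List Char) k => if t k then cheet ++ ['1'] else cheet ++ ['0'])
      = fun cheet k => cheet ++ [chOf (t k)] := by
    funext cheet k
    by_cases h : t k <;> simp [h, chOf]
  rw [hb, PySem.List.foldl_append_singleton_eq_map, List.map_map]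
  simp

theorem pair_eq (t : Int → Bool) (xs : List Int) :
    (PySem.List.count (xs.foldl (fun cheet k => if t k then cheet ++ ['1'] else cheet ++ ['0']) []) '1' : Int)
      + PySem.List.len (PySem.List.pyGetD (PySem.List.sorted (PySem.Chars.splitOn (xs.foldl (fun cheet k => if t k then cheet ++ ['1'] else cheet ++ ['0']) []) ['0']) (fun x => x) true) 0 [])
        * PySem.List.len (PySem.List.pyGetD (PySem.List.sorted (PySem.Chars.splitOn (xs.foldl (fun cheet k => if t k then cheet ++ ['1'] else cheet ++ ['0']) []) ['0']) (fun x => x) true) 0 [])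
    = (xs.foldl (fun (st : Int × Int × Int) k => if t k then (st.1 + 1, st.2.1 + 1, if st.2.1 + 1 > st.2.2 then st.2.1 + 1 else st.2.2) else (st.1, 0, st.2.2)) (0, 0, 0)).1
      + (xs.foldl (fun (st : Int × Int × Int) k => if t k then (st.1 + 1, st.2.1 + 1, if st.2.1 + 1 > st.2.2 then st.2.1 + 1 else st.2.2) else (st.1, 0, st.2.2)) (0, 0, 0)).2.2
        * (xs.foldl (fun (st : Int × Int × Int) k => if t k then (st.1 + 1, st.2.1 + 1, if st.2.1 + 1 > st.2.2 then st.2.1 + 1 else st.2.2) else (st.1, 0, st.2.2)) (0, 0, 0)).2.2 := by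
  set bs := xs.map t with hbs
  -- B-side: split the triple fold
  have hsplit : (fun (st : Int × Int × Int) k => if t k then (st.1 + 1, st.2.1 + 1, if st.2.1 + 1 > st.2.2 then st.2.1 + 1 else st.2.2) else (st.1, 0, st.2.2))
      = fun (st : Int × Int × Int) k => ((fun (c : Int) k => if t k then c + 1 else c) st.1 k, (fun rb k => stepRB rb (t k)) st.2 k) := by
    funext st k
    by_cases h : t k <;> simp [h, stepRB]
  rw [hsplit, PySem.List.foldl_prod_mk (f := fun (c : Int) k => if t k then c + 1 else c) (g := fun rb k => stepRB rb (t k))]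
  simp only
  -- count component
  rw [PySem.List.foldl_if_add_one]
  -- run component
  have hrb : xs.foldl (fun rb k => stepRB rb (t k)) ((0 : Int), (0 : Int)) = bs.foldl stepRB (0, 0) := by
    rw [hbs, List.foldl_map]
  rw [hrb, bestfold bs 0 0 le_rfl le_rfl]
  have hmax : max (0 : Int) (mrun 0 bs) = mrun 0 bs := max_eq_right (mrun_ge 0 bs)
  rw [hmax]
  -- A-side
  rw [cheet_fold, ← hbs, PySem.List.count_eq]
  have hcount : (bs.map chOf).count '1' = bs.count true := by
    have : '1' = chOf true := rfl
    rw [this, List.count_map_of_injective _ chOf chOf_inj]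
  rw [hcount, splitOn_chunks, head_sorted_repl]
  have hlen : PySem.List.len (List.replicate (maxN (runsB bs).1 (runsB bs).2) '1') = ((maxN (runsB bs).1 (runsB bs).2 : Nat) : Int) := by
    simp [PySem.List.len_eq]
  rw [hlen, maxN_cast]
  have hc2 : bs.count true = xs.countP t := by
    rw [hbs, List.count_eq_countP, List.countP_map]
    simp [Function.comp_def]
  rw [hc2]
  have : mrun 0 bs = ((runsB bs).2.map (Nat.cast : Nat → Int)).foldl max ((runsB bs).1 : Int) := by
    simp [mrun]
  rw [this]
  ring

def maxStep (b : Option Int) (v : Int) : Option Int :=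
  match b with
  | none => some v
  | some u => if v > u then some v else some u

theorem maxStep_some : ∀ (l : List Int) (u : Int), l.foldl maxStep (some u) = some (l.foldl max u) := by
  intro l
  induction l with
  | nil => intro u; rfl
  | cons x t ih =>
    intro u
    have : maxStep (some u) x = some (max u x) := by
      simp only [maxStep]
      by_cases h : x > u
      · rw [if_pos h]
        congr 1
        omega
      · rw [if_neg h]
        congr 1
        omega
    rw [List.foldl_cons, this, List.foldl_cons, ih]

theorem maxfold (l : List Int) :
    (PySem.List.max? l (fun x => x)).getD 0 = (l.foldl maxStep none).getD 0 := by
  cases l with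
  | nil => rfl
  | cons x t =>
    rw [PySem.List.max?_id_cons, List.foldl_cons]
    have : maxStep none x = some x := rfl
    rw [this, maxStep_some]

theorem outer_eq (outer : List Int) (inner : Int → List Int) (f g : Int → Int → Int)
    (hfg : ∀ i j, f i j = g i j) :
    (PySem.List.max? (outer.foldl (fun acc i => (inner i).foldl (fun acc j => acc ++ [f i j]) acc) ([] : List Int)) (fun x => x)).getD 0
    = (outer.foldl (fun b i => (inner i).foldl (fun b j => maxStep b (g i j)) b) (none : Option Int)).getD 0 := by
  have hA : (fun (acc : List Int) i => (inner i).foldl (fun acc j => acc ++ [f i j]) acc)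
      = fun acc i => acc ++ (inner i).map (f i) := by
    funext acc i
    rw [PySem.List.foldl_append_singleton_eq_map]
  have hB : (fun (b : Option Int) i => (inner i).foldl (fun b j => maxStep b (g i j)) b)
      = fun b i => ((inner i).map (g i)).foldl maxStep b := by
    funext b i
    rw [List.foldl_map]
  rw [hA, hB, PySem.List.foldl_append_eq_flatMap, ← List.foldl_flatMap]
  have hmap : outer.flatMap (fun i => (inner i).map (f i)) = outer.flatMap (fun i => (inner i).map (g i)) := by
    congr 1
    funext i
    congr 1
    funext j
    exact hfg i j
  rw [List.nil_append, hmap, maxfold]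

theorem solution_spec : Claim_equal_solution := by
  intro answer_sheet sheet _ _
  unfold Spec_solution solution solution_alt
  exact outer_eq _ _ _ _
    (fun i j => pair_eq
      (fun k => (PySem.List.pyGetD (PySem.List.pyGetD sheet i []) k "" == PySem.List.pyGetD (PySem.List.pyGetD sheet j []) k "")
        && (PySem.List.pyGetD (PySem.List.pyGetD sheet i []) k "" != PySem.List.pyGetD answer_sheet k ""))
      (PySem.List.pyRange 0 (PySem.List.len answer_sheet) 1))
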